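-- pv_equiv track=rewrite | github.com/msalameh83/Algorithms | BinarySearchTree/problems/one_child_bst.py | one_child_bst
-- ===== SOURCE A (Python) =====
-- def one_child_bst(bst):
--     max_so_far = bst[-1]
--     min_so_far = bst[-1]
--
--     for i in range(len(bst)-2, -1, -1):
--         if not ( bst[i] < min_so_far or bst[i] > max_so_far ):
--             return False
--         max_so_far = max(bst[i], max_so_far)
--         min_so_far = min(bst[i], min_so_far)
--     return True
-- ===== SOURCE B (Python) =====
-- def one_child_bst(bst):
--     root = bst[0]
--     rest = bst[1:]
--     while rest:
--         if not (all(x < root for x in rest) or all(x > root for x in rest)):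
--             return False
--         root, rest = rest[0], rest[1:]
--     return True
-- ===== Notes on version B (the rewrite author's own statement) =====
-- stated objective: alternative
-- what changed: Instead of a right-to-left scan maintaining running min/max, B walks the preorder list left-to-right, checking at each node that all remaining elements lie strictly on one side of it (full suffix scan), trading the O(n) state-keeping pass for a direct O(n^2) restatement of the one-child-BST condition.
import Mathlib
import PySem

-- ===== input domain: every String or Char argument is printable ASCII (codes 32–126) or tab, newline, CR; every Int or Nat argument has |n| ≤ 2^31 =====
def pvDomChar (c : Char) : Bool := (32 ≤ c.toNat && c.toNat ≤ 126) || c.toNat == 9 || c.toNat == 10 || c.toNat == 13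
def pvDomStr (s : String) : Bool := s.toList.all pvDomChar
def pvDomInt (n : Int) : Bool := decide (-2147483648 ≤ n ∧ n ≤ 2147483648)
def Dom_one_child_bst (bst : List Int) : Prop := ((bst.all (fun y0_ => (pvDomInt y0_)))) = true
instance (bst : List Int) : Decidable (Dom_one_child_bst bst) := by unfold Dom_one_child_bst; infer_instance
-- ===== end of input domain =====

-- B replaces A's right-to-left running-min/max scan by a left-to-right walk that re-scans
-- each suffix for 'all strictly on one side of the current root' (alternative decomposition, not faster).

-- ===== PORT A =====
-- loop body: state (still_running, max_so_far, min_so_far); once a 'return False' fires the flag stays false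
def oneChildStep (bst : List Int) (st : Bool × Int × Int) (i : Int) : Bool × Int × Int :=
  match st with
  | (false, mx, mn) => (false, mx, mn)
  | (true, mx, mn) =>
    match PySem.List.pyGet? bst i with
    | none => (false, mx, mn)  -- IndexError: unreachable, loop indices are always in range
    | some v =>
      if !(decide (v < mn) || decide (v > mx)) then (false, mx, mn)
      else (true, max v mx, min v mn)

def one_child_bst (bst : List Int) : Bool :=
  match PySem.List.pyGet? bst (-1) with
  | none => false  -- bst[-1] raises IndexError on []; excluded by Pre_
  | some last =>
    ((PySem.List.pyRange ((bst.length : Int) - 2) (-1) (-1)).foldl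
      (oneChildStep bst) (true, last, last)).1

-- ===== PORT B =====
-- the while loop: current root and remaining suffix
def oneChildLoop : Int → List Int → Bool
  | _, [] => true
  | root, r :: rs =>
    if !((r :: rs).all (fun x => decide (x < root)) || (r :: rs).all (fun x => decide (x > root))) then
      false
    else oneChildLoop r rs

def one_child_bst_alt (bst : List Int) : Bool :=
  match bst with
  | [] => false  -- bst[0] raises IndexError on []; excluded by Pre_
  | root :: rest => oneChildLoop root rest

-- ===== PRECONDITION & SPEC =====
-- Pre_ excludes only the empty list, on which both Pythons raise IndexError.
def Pre_one_child_bst (bst : List Int) : Prop := bst ≠ []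
instance (bst : List Int) : Decidable (Pre_one_child_bst bst) := by unfold Pre_one_child_bst; infer_instance
def pvWitness_one_child_bst : List Int := ([3, 1, 2])

def Spec_one_child_bst (bst : List Int) (out : Bool) : Prop := out = one_child_bst_alt bst
instance (bst : List Int) (out : Bool) : Decidable (Spec_one_child_bst bst out) := by unfold Spec_one_child_bst; infer_instance

-- ===== CLAIM (what is proved, stated in full; the proofs are below) =====
def Claim_equal_one_child_bst : Prop := ∀ (bst : List Int), Dom_one_child_bst bst → Pre_one_child_bst bst → Spec_one_child_bst bst (one_child_bst bst)

-- ===== LEMMAS AND PROOFS =====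

-- A's loop, on the values it reads (bst[k-1], …, bst[0]), as a plain recursion
def goA : List Int → Int → Int → Bool
  | [], _, _ => true
  | v :: vs, mx, mn =>
    if !(decide (v < mn) || decide (v > mx)) then false else goA vs (max v mx) (min v mn)

theorem goA_singleton (v mx mn : Int) :
    goA [v] mx mn = (decide (v < mn) || decide (mx < v)) := by
  rw [goA]
  simp only [gt_iff_lt]
  cases h : (decide (v < mn) || decide (mx < v)) with
  | false => simp only [Bool.not_false, if_true]
  | true => simp only [Bool.not_true]; rfl

theorem foldl_step_false (bst : List Int) (r : List Int) (mx mn : Int) :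
    r.foldl (oneChildStep bst) (false, mx, mn) = (false, mx, mn) := by
  induction r with
  | nil => rfl
  | cons i r ih => simpa [oneChildStep] using ih

theorem foldl_step_range (bst : List Int) (k : Nat) (hk : k ≤ bst.length) (mx mn : Int) :
    ((PySem.List.pyRange ((k : Int) - 1) (-1) (-1)).foldl (oneChildStep bst) (true, mx, mn)).1
      = goA ((bst.take k).reverse) mx mn := by
  induction k generalizing mx mn with
  | zero => rw [PySem.List.pyRange_neg_one_eq_nil (by omega)]; rfl
  | succ k ih =>
    have h1 : ((k + 1 : Nat) : Int) - 1 = (k : Int) := by push_cast; ring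
    rw [h1, PySem.List.pyRange_neg_one_cons (by omega)]
    have hlt : k < bst.length := by omega
    have hget : PySem.List.pyGet? bst (k : Int) = some bst[k] := by
      rw [PySem.List.pyGet?_natCast]; exact List.getElem?_eq_getElem hlt
    have htake : (bst.take (k + 1)).reverse = bst[k] :: (bst.take k).reverse := by
      rw [List.take_add_one, List.getElem?_eq_getElem hlt]
      simp
    rw [htake, List.foldl_cons, goA]
    simp only [oneChildStep, hget]
    cases h : (decide (bst[k] < mn) || decide (bst[k] > mx)) with
    | false =>
      simp only [Bool.not_false, if_true]
      rw [foldl_step_false]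
    | true =>
      simp only [Bool.not_true]
      exact ih (by omega) _ _

theorem goA_append (l1 l2 : List Int) (mx mn : Int) :
    goA (l1 ++ l2) mx mn
      = (goA l1 mx mn && goA l2 (l1.foldl max mx) (l1.foldl min mn)) := by
  induction l1 generalizing mx mn with
  | nil =>
    simp only [List.nil_append, List.foldl_nil]
    show goA l2 mx mn = (true && goA l2 mx mn)
    rw [Bool.true_and]
  | cons v l1 ih =>
    simp only [List.cons_append, goA, List.foldl_cons]
    cases h : (decide (v < mn) || decide (v > mx)) with
    | false =>
      simp only [Bool.not_false, if_true, Bool.false_and]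
    | true =>
      simp only [Bool.not_true]
      rw [if_neg Bool.false_ne_true, if_neg Bool.false_ne_true, ih,
        max_comm v mx, min_comm v mn]

theorem lt_foldl_min (r : List Int) (z x : Int) :
    x < r.foldl min z ↔ x < z ∧ ∀ y ∈ r, x < y := by
  induction r generalizing z with
  | nil => simp
  | cons y r ih =>
    simp only [List.foldl_cons, ih, lt_min_iff, List.mem_cons]
    constructor
    · rintro ⟨⟨h1, h2⟩, h3⟩; exact ⟨h1, by rintro w (rfl | hw); exacts [h2, h3 w hw]⟩
    · rintro ⟨h1, h2⟩; exact ⟨⟨h1, h2 y (Or.inl rfl)⟩, fun w hw => h2 w (Or.inr hw)⟩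

theorem foldl_max_lt (r : List Int) (z x : Int) :
    r.foldl max z < x ↔ z < x ∧ ∀ y ∈ r, y < x := by
  induction r generalizing z with
  | nil => simp
  | cons y r ih =>
    simp only [List.foldl_cons, ih, max_lt_iff, List.mem_cons]
    constructor
    · rintro ⟨⟨h1, h2⟩, h3⟩; exact ⟨h1, by rintro w (rfl | hw); exacts [h2, h3 w hw]⟩
    · rintro ⟨h1, h2⟩; exact ⟨⟨h1, h2 y (Or.inl rfl)⟩, fun w hw => h2 w (Or.inr hw)⟩

theorem oneChildLoop_ne_nil (x : Int) (s : List Int) (hs : s ≠ []) :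
    oneChildLoop x s
      = ((s.all (fun y => decide (y < x)) || s.all (fun y => decide (y > x))) && one_child_bst_alt s) := by
  match s with
  | r :: rs =>
    rw [oneChildLoop]
    cases h : ((r :: rs).all (fun y => decide (y < x)) || (r :: rs).all (fun y => decide (y > x))) with
    | false =>
      simp only [Bool.not_false, if_true, Bool.false_and]
    | true =>
      simp only [Bool.not_true, Bool.true_and]
      rfl

theorem goA_reverse_eq_alt (m : List Int) (z : Int) :
    goA m.reverse z z = one_child_bst_alt (m ++ [z]) := by
  induction m with
  | nil => rfl
  | cons x m ih =>
    have hLHS : goA (x :: m).reverse z z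
        = (one_child_bst_alt (m ++ [z])
            && (decide (x < m.reverse.foldl min z) || decide (m.reverse.foldl max z < x))) := by
      rw [List.reverse_cons, goA_append, ih]
      congr 1
      exact goA_singleton x _ _
    rw [hLHS, List.cons_append,
      show one_child_bst_alt (x :: (m ++ [z])) = oneChildLoop x (m ++ [z]) from rfl,
      oneChildLoop_ne_nil x (m ++ [z]) (by simp), Bool.and_comm]
    congr 1
    rw [Bool.eq_iff_iff]
    simp only [Bool.or_eq_true, decide_eq_true_eq, List.all_eq_true, List.mem_append,
      List.mem_singleton, lt_foldl_min, foldl_max_lt, List.mem_reverse, gt_iff_lt]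
    constructor
    · rintro (⟨hz, hm⟩ | ⟨hz, hm⟩)
      · exact Or.inr (by rintro y (hy | rfl); exacts [hm y hy, hz])
      · exact Or.inl (by rintro y (hy | rfl); exacts [hm y hy, hz])
    · rintro (h | h)
      · exact Or.inr ⟨h z (Or.inr rfl), fun y hy => h y (Or.inl hy)⟩
      · exact Or.inl ⟨h z (Or.inr rfl), fun y hy => h y (Or.inl hy)⟩

-- ===== VERDICT (by name: the statement is the Claim_ definition above) =====
theorem one_child_bst_spec : Claim_equal_one_child_bst := by
  intro bst _ hpre
  unfold Spec_one_child_bst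
  rcases bst.eq_nil_or_concat with rfl | ⟨m, z, rfl⟩
  · exact absurd rfl hpre
  · rw [List.concat_eq_append]
    show (match PySem.List.pyGet? (m ++ [z]) (-1) with
      | none => false
      | some last =>
        ((PySem.List.pyRange (((m ++ [z]).length : Int) - 2) (-1) (-1)).foldl
          (oneChildStep (m ++ [z])) (true, last, last)).1) = one_child_bst_alt (m ++ [z])
    rw [PySem.List.pyGet?_neg_one_append_singleton]
    have hlen : (((m ++ [z]).length : Int)) - 2 = ((m.length : Nat) : Int) - 1 := by
      simp
      ring
    rw [hlen]
    show ((PySem.List.pyRange (((m.length : Nat) : Int) - 1) (-1) (-1)).foldl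
      (oneChildStep (m ++ [z])) (true, z, z)).1 = one_child_bst_alt (m ++ [z])
    rw [foldl_step_range (m ++ [z]) m.length (by simp), List.take_left, goA_reverse_eq_alt]
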